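-- pv_equiv track=rewrite | github.com/cristianrmm/Yu-Gi-Oh | Yu-Gi-Oh.py | CardDesc
-- ===== SOURCE A (Python) =====
-- def CardDesc(cardsInfo):
--     allsets= []
--     n = 1
--     for i in UniqueSet(cardsInfo):
--         for j in i:
--             if j not in allsets:
--                 allsets.append(j)
--     return allsets
--
-- def Dect_Equal(list1, list2):
--     same = True
--     for i in list1:
--         if i in list2:
--             same = True
--         else:
--             return False
--     for i in list2:
--         if i in list1:
--             same = True
--         else:
--             return False
--     return same
--
-- def UniqueSet(cardsInfo):
--     count = len(cardsInfo)
--     n = 0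
--     j = 0
--     myset = [cardsInfo[0]]
--     match = 0
--     same = True
--     while n < count:
--         while j < len(myset):
--             if(Dect_Equal(myset[j],cardsInfo[n])):
--                 match = match + 1
--             j = j + 1
--         if (match == 0):
--              myset.append(cardsInfo[n])
--         match = 0
--         j = 0
--         n = n + 1
--
--     return myset
-- ===== SOURCE B (Python) =====
-- def CardDesc(cardsInfo):
--     seen = []
--     for sub in cardsInfo:
--         for j in sub:
--             if j not in seen:
--                 seen.append(j)
--     return seen
-- ===== Notes on version B (the rewrite author's own statement) =====
-- stated objective: simpler
-- what changed: B drops A's quadratic UniqueSet set-equality dedup pass over the sublists entirely (it provably cannot change an order-preserving first-occurrence flatten) and computes the result in one direct flatten-with-membership loop.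
import Mathlib
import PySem

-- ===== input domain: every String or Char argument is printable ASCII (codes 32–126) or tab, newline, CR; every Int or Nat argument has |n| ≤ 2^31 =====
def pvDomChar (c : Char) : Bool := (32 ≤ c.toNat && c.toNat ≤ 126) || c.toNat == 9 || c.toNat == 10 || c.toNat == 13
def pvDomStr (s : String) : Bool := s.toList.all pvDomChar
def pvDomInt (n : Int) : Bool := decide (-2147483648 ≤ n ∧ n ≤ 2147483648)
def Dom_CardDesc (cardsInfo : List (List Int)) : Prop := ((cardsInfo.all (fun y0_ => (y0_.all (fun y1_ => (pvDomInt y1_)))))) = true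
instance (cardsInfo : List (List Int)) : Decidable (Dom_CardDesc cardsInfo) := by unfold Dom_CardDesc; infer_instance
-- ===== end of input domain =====

-- B drops A's UniqueSet set-equality dedup pass (it cannot change a first-occurrence flatten)
-- and flattens in one direct loop; equivalence of return values proved on nonempty input.

-- ===== PORT A =====
-- Dect_Equal: two early-return membership loops = conjunction of two 'all' scans
def dectEqual (l1 l2 : List Int) : Bool :=
  (l1.all fun i => l2.contains i) && (l2.all fun i => l1.contains i)

-- one iteration of UniqueSet's outer while loop (state = myset, index n)
def uniqueSetStep (cardsInfo : List (List Int)) (myset : List (List Int)) (n : Nat) :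
    List (List Int) :=
  let cur := cardsInfo.getD n []
  let m := (List.range myset.length).foldl
    (fun m j => if dectEqual (myset.getD j []) cur then m + 1 else m) 0
  if m == 0 then myset ++ [cur] else myset

def uniqueSetA (cardsInfo : List (List Int)) : List (List Int) :=
  match cardsInfo with
  | [] => []   -- Python raises IndexError on cardsInfo[0]; excluded by Pre_CardDesc
  | c0 :: _ =>
    (List.range cardsInfo.length).foldl (uniqueSetStep cardsInfo) [c0]

def CardDesc (cardsInfo : List (List Int)) : List Int :=
  (uniqueSetA cardsInfo).foldl
    (fun allsets i => i.foldl (fun a j => if a.contains j then a else a ++ [j]) allsets) []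

-- ===== PORT B =====
def CardDesc_alt (cardsInfo : List (List Int)) : List Int :=
  cardsInfo.foldl
    (fun seen sub => sub.foldl (fun s j => if s.contains j then s else s ++ [j]) seen) []

-- ===== PRECONDITION & SPEC =====
-- Pre_ excludes only the empty list, on which A raises IndexError (cardsInfo[0]).
def Pre_CardDesc (cardsInfo : List (List Int)) : Prop := cardsInfo ≠ []
instance (cardsInfo : List (List Int)) : Decidable (Pre_CardDesc cardsInfo) := by
  unfold Pre_CardDesc; infer_instance

def pvWitness_CardDesc : List (List Int) := [[1, 2], [2, 1, 2], [3]]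

def Spec_CardDesc (cardsInfo : List (List Int)) (out : List Int) : Prop := out = CardDesc_alt cardsInfo
instance (cardsInfo : List (List Int)) (out : List Int) : Decidable (Spec_CardDesc cardsInfo out) := by unfold Spec_CardDesc; infer_instance

-- ===== CLAIM (what is proved, stated in full; the proofs are below) =====
def Claim_equal_CardDesc : Prop := ∀ (cardsInfo : List (List Int)), Dom_CardDesc cardsInfo → Pre_CardDesc cardsInfo → Spec_CardDesc cardsInfo (CardDesc cardsInfo)

-- ===== LEMMAS AND PROOFS =====

-- abbreviations used only by the proofs
def dedupF (a : List Int) (l : List Int) : List Int :=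
  l.foldl (fun a j => if a.contains j then a else a ++ [j]) a
def dedupFF (a : List Int) (L : List (List Int)) : List Int :=
  L.foldl dedupF a

theorem mem_dedupF (a l : List Int) (x : Int) : x ∈ dedupF a l ↔ x ∈ a ∨ x ∈ l := by
  induction l generalizing a with
  | nil => simp [dedupF]
  | cons hd t ih =>
    simp only [dedupF, List.foldl_cons] at *
    by_cases hc : hd ∈ a
    · rw [if_pos (by simpa using hc), ih]
      simp only [List.mem_cons]
      constructor
      · rintro (h1 | h1)
        exacts [Or.inl h1, Or.inr (Or.inr h1)]
      · rintro (h1 | h1 | h1)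
        exacts [Or.inl h1, Or.inl (h1 ▸ hc), Or.inr h1]
    · rw [if_neg (by simpa using hc), ih]
      simp [List.mem_append, or_assoc]

theorem dedupF_of_subset (a l : List Int) (h : ∀ x ∈ l, x ∈ a) : dedupF a l = a := by
  induction l generalizing a with
  | nil => rfl
  | cons hd t ih =>
    simp only [dedupF, List.foldl_cons]
    have : a.contains hd := by simpa using h hd (by simp)
    rw [if_pos this]
    exact ih a (fun x hx => h x (by simp [hx]))

theorem mem_dedupFF (a : List Int) (L : List (List Int)) (x : Int) :
    x ∈ dedupFF a L ↔ x ∈ a ∨ ∃ l ∈ L, x ∈ l := by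
  induction L generalizing a with
  | nil => simp [dedupFF]
  | cons h t ih =>
    simp only [dedupFF, List.foldl_cons] at *
    rw [ih, mem_dedupF]
    simp [or_assoc]

theorem count_foldl (l : List Nat) (P : Nat → Bool) (s : Nat) :
    l.foldl (fun m j => if P j then m + 1 else m) s = s + l.countP P := by
  induction l generalizing s with
  | nil => simp
  | cons h t ih =>
    simp only [List.foldl_cons, List.countP_cons]
    by_cases hp : P h <;> simp [hp, ih] <;> omega

theorem dectEqual_self (l : List Int) : dectEqual l l = true := by
  simp [dectEqual, List.all_eq_true]

theorem dectEqual_subset {l1 l2 : List Int} (h : dectEqual l1 l2 = true) :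
    ∀ x ∈ l2, x ∈ l1 := by
  simp only [dectEqual, Bool.and_eq_true, List.all_eq_true] at h
  intro x hx
  simpa using h.2 x hx

-- the invariant of A's outer while loop: after n iterations, flatten-dedup of myset
-- equals flatten-dedup of the first (max n 1) input sublists
theorem uniqueSet_invariant (c0 : List Int) (rest : List (List Int)) (n : Nat)
    (hn : n ≤ (c0 :: rest).length) :
    dedupFF [] ((List.range n).foldl (uniqueSetStep (c0 :: rest)) [c0]) =
      dedupFF [] ((c0 :: rest).take (max n 1)) := by
  induction n with
  | zero => simp
  | succ n ih =>
    have hn' : n ≤ (c0 :: rest).length := Nat.le_of_succ_le hn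
    have hlt : n < (c0 :: rest).length := hn
    rw [List.range_succ, List.foldl_append, List.foldl_cons, List.foldl_nil]
    set xs := c0 :: rest with hxs
    set myset := (List.range n).foldl (uniqueSetStep xs) [c0] with hm
    have hcur : xs.getD n [] = xs[n] := List.getD_eq_getElem xs [] hlt
    have htake : xs.take (n + 1) = xs.take n ++ [xs[n]] := by
      rw [List.take_succ]; simp [List.getElem?_eq_getElem hlt]
    -- unfold one step
    show dedupFF [] (uniqueSetStep xs myset n) = dedupFF [] (xs.take (max (n+1) 1))
    unfold uniqueSetStep
    simp only [hcur]
    by_cases hz : ((List.range myset.length).foldl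
        (fun m j => if dectEqual (myset.getD j []) xs[n] then m + 1 else m) 0) = 0
    · -- match = 0: sublist appended
      rw [if_pos (by simpa using hz)]
      cases n with
      | zero =>
        -- impossible: dectEqual c0 c0 makes match ≥ 1
        exfalso
        rw [count_foldl, Nat.zero_add, List.countP_eq_zero] at hz
        have hms : myset = [c0] := by simp [hm]
        have h0 := hz 0 (by simp [hms])
        rw [hms] at h0
        simp [hxs, dectEqual_self] at h0
      | succ k =>
        have hmax1 : max (k + 1) 1 = k + 1 := by omega
        have hmax2 : max (k + 2) 1 = k + 2 := by omega
        rw [hmax2, htake]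
        simp only [dedupFF, List.foldl_append, List.foldl_cons, List.foldl_nil]
        rw [hmax1] at ih
        have ih' := ih hn'
        simp only [dedupFF] at ih'
        rw [ih']
    · -- match ≠ 0: some member of myset is set-equal to xs[n], nothing appended
      rw [if_neg (by simpa using hz)]
      rw [count_foldl] at hz
      simp only [Nat.zero_add] at hz
      have hex : ∃ j ∈ List.range myset.length,
          dectEqual (myset.getD j []) xs[n] = true := by
        by_contra hno
        push_neg at hno
        exact hz (List.countP_eq_zero.mpr (fun j hj => by simpa [List.getD] using hno j hj))
      obtain ⟨j, hj, hdeq⟩ := hex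
      rw [List.mem_range] at hj
      have hmem : myset.getD j [] ∈ myset := by
        rw [List.getD_eq_getElem myset [] hj]; exact List.getElem_mem hj
      have hsub : ∀ x ∈ (xs[n] : List Int), x ∈ dedupFF [] myset := by
        intro x hx
        rw [mem_dedupFF]
        exact Or.inr ⟨_, hmem, dectEqual_subset hdeq x hx⟩
      cases n with
      | zero =>
        have := ih (Nat.zero_le _)
        simpa using this
      | succ k =>
        have hmax1 : max (k + 1) 1 = k + 1 := by omega
        have hmax2 : max (k + 2) 1 = k + 2 := by omega
        rw [hmax2, htake]
        simp only [dedupFF, List.foldl_append, List.foldl_cons, List.foldl_nil]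
        rw [hmax1] at ih
        have ih' := ih hn'
        simp only [dedupFF] at ih'
        rw [← ih']
        exact (dedupF_of_subset _ _ (fun x hx => by
          have := hsub x hx; simpa [dedupFF] using this)).symm

-- ===== VERDICT (by name: the statement is the Claim_ definition above) =====
theorem CardDesc_spec : Claim_equal_CardDesc := by
  intro cardsInfo _ hpre
  show CardDesc cardsInfo = CardDesc_alt cardsInfo
  match cardsInfo, hpre with
  | c0 :: rest, _ =>
    have h := uniqueSet_invariant c0 rest (c0 :: rest).length (le_refl _)
    have hmax : max (c0 :: rest).length 1 = (c0 :: rest).length := by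
      simp
    rw [hmax, List.take_length] at h
    show dedupFF [] (uniqueSetA (c0 :: rest)) = dedupFF [] (c0 :: rest)
    simpa [uniqueSetA] using h
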